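-- pv_equiv track=rewrite | github.com/jabaier/iic1103.20152.s5 | ejercicios_i2/emparejamiento_pingpong.py | empingpong
-- ===== SOURCE A (Python) =====
-- def empingpong(l1,l2):
--     #dadas dos listas l1 y l2 tales que len(l1)<=len(l2) retorna el emparejamiento ping-pong de l1 con l2
--     emp = []
--     l1 = l1+l1[-2:0:-1] # l1 ahora tiene un pedazo adicional de l1 pero invertido
--     i = 0
--     while i<len(l2):  # emparejamiento entre l2 y l1 'rotando' el indice de l1
--         emp.append([l2[i],l1[i%len(l1)]])
--         i = i+1
--     return emp
-- ===== SOURCE B (Python) =====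
-- def empingpong(l1, l2):
--     # triangle-wave index instead of building the reflected extension of l1
--     n = len(l1)
--     period = 2*(n-1) if n > 1 else 1
--     res = []
--     for i, x in enumerate(l2):
--         p = i % period
--         idx = p if p < n else period - p
--         res.append([x, l1[idx]])
--     return res
-- ===== Notes on version B (the rewrite author's own statement) =====
-- stated objective: simpler
-- what changed: B drops A's precomputed reflected extension l1+l1[-2:0:-1] and instead computes each pairing index directly with a triangle-wave formula (p = i % (2*(n-1)); idx = p if p < n else period - p), so no auxiliary list is built.
import Mathlib
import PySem

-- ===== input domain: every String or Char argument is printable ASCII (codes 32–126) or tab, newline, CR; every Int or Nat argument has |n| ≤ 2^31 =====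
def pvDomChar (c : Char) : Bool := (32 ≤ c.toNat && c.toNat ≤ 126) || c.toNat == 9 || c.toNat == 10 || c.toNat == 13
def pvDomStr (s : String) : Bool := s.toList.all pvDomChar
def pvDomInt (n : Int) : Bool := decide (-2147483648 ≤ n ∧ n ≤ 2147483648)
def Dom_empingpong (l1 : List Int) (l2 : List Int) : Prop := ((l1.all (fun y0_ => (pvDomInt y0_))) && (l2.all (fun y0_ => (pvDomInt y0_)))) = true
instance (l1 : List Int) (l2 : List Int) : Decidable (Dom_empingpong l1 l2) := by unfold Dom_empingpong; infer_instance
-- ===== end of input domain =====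

-- B replaces A's precomputed reflected extension of l1 by a per-step triangle-wave index formula; objective: simpler.
-- ===== PORT A =====
def empingpong (l1 : List Int) (l2 : List Int) : List (List Int) :=
  -- l1 = l1 + l1[-2:0:-1]  (step -1 is nonzero, so slice? always returns some)
  let l1e := l1 ++ (PySem.List.slice? l1 (some (-2)) (some 0) (-1)).getD []
  -- while i < len(l2): emp.append([l2[i], l1[i % len(l1)]]); i += 1
  (PySem.List.pyRange 0 (l2.length : Int) 1).foldl
    (fun emp i =>
      emp ++ [[PySem.List.pyGetD l2 i 0,
               PySem.List.pyGetD l1e (PySem.Int.mod i ((l1e.length : Int))) 0]])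
    []

-- ===== PORT B =====
def empingpong_alt (l1 : List Int) (l2 : List Int) : List (List Int) :=
  let n : Int := l1.length
  let period : Int := if n > 1 then 2 * (n - 1) else 1
  (PySem.List.enumerate l2).foldl
    (fun res ix =>
      let p := PySem.Int.mod ix.1 period
      let idx := if p < n then p else period - p
      res ++ [[ix.2, PySem.List.pyGetD l1 idx 0]])
    []

-- ===== PRECONDITION & SPEC =====
-- Pre_ excludes only l1 = [] with l2 nonempty, on which A raises ZeroDivisionError (i % 0) and B raises IndexError.
def Pre_empingpong (l1 : List Int) (l2 : List Int) : Prop := l1 ≠ [] ∨ l2 = []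
instance (l1 : List Int) (l2 : List Int) : Decidable (Pre_empingpong l1 l2) := by unfold Pre_empingpong; infer_instance
def pvWitness_empingpong : List Int × List Int := ([1, 2, 3], [5, 6, 7, 8, 9, 10, 11])

def Spec_empingpong (l1 : List Int) (l2 : List Int) (out : List (List Int)) : Prop := out = empingpong_alt l1 l2
instance (l1 : List Int) (l2 : List Int) (out : List (List Int)) : Decidable (Spec_empingpong l1 l2 out) := by unfold Spec_empingpong; infer_instance

-- ===== CLAIM (what is proved, stated in full; the proofs are below) =====
def Claim_equal_empingpong : Prop := ∀ (l1 : List Int) (l2 : List Int), Dom_empingpong l1 l2 → Pre_empingpong l1 l2 → Spec_empingpong l1 l2 (empingpong l1 l2)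

-- ===== LEMMAS AND PROOFS =====

-- l1[-2:0:-1] is the inner part of l1, read back-to-front (indices len-2 down to 1)
lemma reflect_eq (l : List Int) :
    (PySem.List.slice? l (some (-2)) (some 0) (-1)).getD []
      = (List.range (l.length - 2)).map (fun m => l.getD (l.length - 2 - m) 0) := by
  simp only [PySem.List.slice?, PySem.List.sliceIndices]
  norm_num
  rcases l with _ | ⟨a, _ | ⟨b, _ | ⟨c, t⟩⟩⟩
  · simp
  · simp
  · norm_num
  · simp only [List.length_cons]
    push_cast
    have hmin : min (0:Int) (↑t.length + 1 + 1 + 1 - 1) = 0 := by omega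
    have hmax : max (-2 + ((t.length:Int) + 1 + 1 + 1)) (-1:Int) = ↑t.length + 1 := by omega
    rw [hmin, hmax, if_pos (Or.inl (by omega : 2 + (0:Int) < (t.length:Int) + 1 + 1 + 1))]
    have hc : ((t.length:Int) + 1 - 0).toNat = t.length + 1 := by omega
    rw [hc]
    rw [List.filterMap_congr (g := fun x => some ((a :: b :: c :: t)[t.length + 1 - x]?.getD 0))
      (by
        intro x hx
        have hx' : x < t.length + 1 := List.mem_range.mp hx
        have hidx : ((↑t.length:Int) + 1 + -(↑x:Int)).toNat = t.length + 1 - x := by omega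
        have hlt : t.length + 1 - x < (a :: b :: c :: t).length := by simp; omega
        rw [hidx]
        simp [List.getElem?_eq_getElem hlt])]
    simp

-- reading the extended list at i % len equals the triangle-wave read of l1 itself
lemma key_lemma (l1 : List Int) (h1 : l1 ≠ []) (k : Nat) :
    PySem.List.pyGetD (l1 ++ (PySem.List.slice? l1 (some (-2)) (some 0) (-1)).getD [])
        (PySem.Int.mod (k : Int)
          (((l1 ++ (PySem.List.slice? l1 (some (-2)) (some 0) (-1)).getD []).length : Int))) 0
      = (if PySem.Int.mod (k : Int) (if (l1.length : Int) > 1 then 2 * ((l1.length : Int) - 1) else 1) < (l1.length : Int)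
         then PySem.List.pyGetD l1 (PySem.Int.mod (k : Int) (if (l1.length : Int) > 1 then 2 * ((l1.length : Int) - 1) else 1)) 0
         else PySem.List.pyGetD l1 ((if (l1.length : Int) > 1 then 2 * ((l1.length : Int) - 1) else 1) - PySem.Int.mod (k : Int) (if (l1.length : Int) > 1 then 2 * ((l1.length : Int) - 1) else 1)) 0) := by
  have hN : 0 < l1.length := List.length_pos_iff.mpr h1
  rw [reflect_eq]
  set N := l1.length with hNdef
  set R := (List.range (N - 2)).map (fun m => l1.getD (N - 2 - m) 0) with hRdef
  have hE : (l1 ++ R).length = N + (N - 2) := by simp [hRdef]; rfl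
  have hper : (if (N : Int) > 1 then 2 * ((N : Int) - 1) else 1) = ((l1 ++ R).length : Int) := by
    rw [hE]; split_ifs with h <;> omega
  rw [hper, hE]
  rw [PySem.Int.mod_natCast]
  set j := k % (N + (N - 2)) with hjdef
  have hj : j < N + (N - 2) := Nat.mod_lt _ (by omega)
  by_cases hc : j < N
  · rw [if_pos (by exact_mod_cast hc)]
    rw [PySem.List.pyGetD_natCast, PySem.List.pyGetD_natCast]
    simp only [List.getD]
    rw [List.getElem?_append_left hc]
  · rw [if_neg (by exact_mod_cast hc)]
    have hsub : ((N + (N - 2) : Nat) : Int) - ((j : Nat) : Int) = ((N + (N - 2) - j : Nat) : Int) := by omega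
    rw [hsub, PySem.List.pyGetD_natCast, PySem.List.pyGetD_natCast]
    simp only [List.getD]
    rw [List.getElem?_append_right (by omega : N ≤ j)]
    have hjR : j - N < N - 2 := by omega
    have hR : R[j - N]? = some (l1.getD (N - 2 - (j - N)) 0) := by
      rw [hRdef]
      rw [List.getElem?_map, List.getElem?_range hjR]
      rfl
    rw [show l1.length = N from rfl, hR]
    have : N - 2 - (j - N) = N + (N - 2) - j := by omega
    rw [this]
    simp [List.getD]

theorem main_eq (l1 l2 : List Int) (h : Pre_empingpong l1 l2) :
    empingpong l1 l2 = empingpong_alt l1 l2 := by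
  rcases eq_or_ne l2 [] with h2 | h2
  · subst h2
    simp [empingpong, empingpong_alt, PySem.List.enumerate,
      PySem.List.pyRange_one_eq_nil (le_refl (0:Int))]
  · have h1 : l1 ≠ [] := by
      rcases h with h | h
      · exact h
      · exact absurd h h2
    unfold empingpong empingpong_alt
    simp only []
    rw [PySem.List.foldl_append_singleton_eq_map, PySem.List.foldl_append_singleton_eq_map]
    simp only [List.nil_append]
    apply List.ext_getElem
    · simp [PySem.List.length_pyRange_one, PySem.List.length_enumerate]
    · intro k hk1 hk2
      simp only [List.getElem_map]
      rw [PySem.List.getElem_pyRange_one, PySem.List.getElem_enumerate]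
      simp only [zero_add]
      have hklt : k < l2.length := by
        simpa [PySem.List.length_pyRange_one] using hk1
      congr 1
      · rw [PySem.List.pyGetD_natCast]
        exact List.getD_eq_getElem _ _ hklt
      · rw [key_lemma l1 h1 k]
        split_ifs <;> rfl

-- ===== VERDICT (by name: the statement is the Claim_ definition above) =====
theorem empingpong_spec : Claim_equal_empingpong := by
  intro l1 l2 _ hpre
  unfold Spec_empingpong
  exact main_eq l1 l2 hpre
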